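-- pv_equiv track=rewrite | github.com/thuva4/Algorithms | tests/runners/cpp_runner.py | dense_indexed_values
-- ===== SOURCE A (Python) =====
-- from typing import Any
--
-- def dense_indexed_values(value: dict[Any, Any]) -> list[Any] | None:
--     if not isinstance(value, dict):
--         return None
--     if not value:
--         return []
--
--     indexed_items: list[tuple[int, Any]] = []
--     for key, item in value.items():
--         try:
--             index = int(key)
--         except (TypeError, ValueError):
--             return None
--         if index < 0:
--             return None
--         indexed_items.append((index, item))
--
--     indexed_items.sort(key=lambda pair: pair[0])
--     sample = indexed_items[0][1]
--
--     def default_value() -> Any: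
--         if isinstance(sample, list):
--             return []
--         return 0
--
--     dense = [default_value() for _ in range(indexed_items[-1][0] + 1)]
--     for index, item in indexed_items:
--         dense[index] = item
--     return dense
-- ===== SOURCE B (Python) =====
-- def dense_indexed_values(value):
--     if not isinstance(value, dict):
--         return None
--     if not value:
--         return []
--
--     # one pass: validate keys, build an int-keyed index->item map,
--     # track the max index and the item at the smallest index seen so far
--     int_map = {}
--     max_index = -1
--     min_index = None
--     sample = None
--     for key, item in value.items():
--         try:
--             index = int(key)
--         except (TypeError, ValueError):
--             return None
--         if index < 0:
--             return None
--         int_map[index] = item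
--         if index > max_index:
--             max_index = index
--         if min_index is None or index < min_index:
--             min_index = index
--             sample = item
--
--     # gather: walk the output positions, constructing a fresh default per gap
--     if isinstance(sample, list):
--         return [int_map[i] if i in int_map else [] for i in range(max_index + 1)]
--     return [int_map[i] if i in int_map else 0 for i in range(max_index + 1)]
-- ===== Notes on version B (the rewrite author's own statement) =====
-- stated objective: idiomatic
-- what changed: Replaces sort + preallocated scatter-fill with a single validating pass that builds an index-keyed dict (tracking max index and the min-index sample), then gathers result positions by dict lookup with a fresh default per gap.
import Mathlib
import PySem

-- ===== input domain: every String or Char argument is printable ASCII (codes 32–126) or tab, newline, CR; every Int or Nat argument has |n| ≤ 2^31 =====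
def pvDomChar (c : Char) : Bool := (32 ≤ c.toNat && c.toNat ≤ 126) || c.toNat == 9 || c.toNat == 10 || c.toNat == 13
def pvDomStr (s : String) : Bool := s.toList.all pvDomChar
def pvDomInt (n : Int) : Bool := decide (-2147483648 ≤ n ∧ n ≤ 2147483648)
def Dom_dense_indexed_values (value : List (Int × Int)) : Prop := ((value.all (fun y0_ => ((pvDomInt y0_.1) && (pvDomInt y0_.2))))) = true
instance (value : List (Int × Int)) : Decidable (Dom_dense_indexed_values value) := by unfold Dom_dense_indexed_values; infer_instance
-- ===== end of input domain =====

-- B replaces A's sort + preallocate-and-scatter with one validating pass building an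
-- index-keyed dict plus max-index/min-sample tracking, then a gather over the positions (idiomatic).

-- ===== PORT A =====
-- A's validation loop: 'int(key)' never raises for an int key; early 'return None' on a negative index
def pvCollectA : List (Int × Int) → Option (List (Int × Int))
  | [] => some []
  | (k, v) :: rest =>
    if k < 0 then none
    else (pvCollectA rest).map (fun t => (k, v) :: t)

-- A's default_value(): 'isinstance(sample, list)' is False for an Int value, so it returns 0 (exact on this type)
def pvDefaultValueA (_sample : Int) : Int := 0

def dense_indexed_values (value : List (Int × Int)) : Option (List Int) :=
  -- 'isinstance(value, dict)' holds for every input of this type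
  if value = [] then some []
  else
    match pvCollectA value with
    | none => none
    | some indexed_items =>
      let sortedItems := PySem.List.sorted indexed_items (fun pair => pair.1) false
      let sample := (sortedItems.headD (0, 0)).2      -- indexed_items[0][1]; list nonempty here
      let last := sortedItems.getLastD (0, 0)         -- indexed_items[-1]; list nonempty here
      let dense := (PySem.List.pyRange 0 (last.1 + 1) 1).map (fun _ => pvDefaultValueA sample)
      -- dense[index] = item: index is always in range here (0 ≤ index ≤ last.1)
      some (sortedItems.foldl (fun acc p => PySem.List.pySetD acc p.1 p.2) dense)

-- ===== PORT B =====
-- B's loop body: validate the key, write intMap[index] = item, update max_index and the min-index sample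
def pvStepB (st : Option (PySem.Dict Int Int × Int × Option (Int × Int))) (p : Int × Int) :
    Option (PySem.Dict Int Int × Int × Option (Int × Int)) :=
  match st with
  | none => none
  | some (intMap, maxIndex, minSample) =>
    if p.1 < 0 then none
    else
      some (intMap.insert p.1 p.2,
            if p.1 > maxIndex then p.1 else maxIndex,
            match minSample with
            | none => some (p.1, p.2)
            | some (mi, s) => if p.1 < mi then some (p.1, p.2) else some (mi, s))

def dense_indexed_values_alt (value : List (Int × Int)) : Option (List Int) :=
  if value = [] then some []
  else
    match value.foldl pvStepB (some (PySem.Dict.empty, -1, none)) with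
    | none => none
    | some (intMap, maxIndex, _minSample) =>
      -- 'isinstance(sample, list)' is False for an Int value, so the gap default is 0 (exact on this type)
      some ((PySem.List.pyRange 0 (maxIndex + 1) 1).map (fun i =>
        match intMap.get? i with
        | some v => v
        | none => (0 : Int)))

-- ===== PRECONDITION & SPEC =====
def Spec_dense_indexed_values (value : List (Int × Int)) (out : Option (List Int)) : Prop := out = dense_indexed_values_alt value
instance (value : List (Int × Int)) (out : Option (List Int)) : Decidable (Spec_dense_indexed_values value out) := by unfold Spec_dense_indexed_values; infer_instance

-- ===== CLAIM (what is proved, stated in full; the proofs are below) =====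
def Claim_equal_dense_indexed_values : Prop := ∀ (value : List (Int × Int)), Dom_dense_indexed_values value → Spec_dense_indexed_values value (dense_indexed_values value)

-- ===== LEMMAS AND PROOFS =====

-- the value of the LAST pair in xs whose index is k (both programs resolve duplicate indices this way)
def pvLastVal (xs : List (Int × Int)) (k : Int) : Option Int :=
  (xs.reverse.find? (fun p => p.1 == k)).map (·.2)

theorem pvLastVal_nil (k : Int) : pvLastVal [] k = none := rfl

theorem pvLastVal_cons (p : Int × Int) (rest : List (Int × Int)) (k : Int) :
    pvLastVal (p :: rest) k =
      match pvLastVal rest k with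
      | some v => some v
      | none => if p.1 = k then some p.2 else none := by
  unfold pvLastVal
  rw [List.reverse_cons, List.find?_append]
  cases h : rest.reverse.find? (fun q => q.1 == k) with
  | some q => simp
  | none =>
    by_cases hk : p.1 = k <;> simp [List.find?_cons, hk]

theorem pvLastVal_append_singleton (xs : List (Int × Int)) (x : Int × Int) (k : Int) :
    pvLastVal (xs ++ [x]) k = if x.1 = k then some x.2 else pvLastVal xs k := by
  unfold pvLastVal
  rw [List.reverse_append, List.reverse_singleton, List.singleton_append]
  by_cases hk : x.1 = k <;> simp [List.find?_cons, hk]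

theorem pvLastVal_eq_none (xs : List (Int × Int)) (k : Int) (h : ∀ p ∈ xs, p.1 ≠ k) :
    pvLastVal xs k = none := by
  unfold pvLastVal
  rw [List.find?_eq_none.mpr]
  · rfl
  · intro p hp
    simp only [List.mem_reverse] at hp
    simpa using h p hp

-- A's validation loop is the identity when every index is nonnegative, none otherwise
theorem pvCollectA_pos (xs : List (Int × Int)) (h : ∀ p ∈ xs, 0 ≤ p.1) :
    pvCollectA xs = some xs := by
  induction xs with
  | nil => rfl
  | cons p rest ih =>
    obtain ⟨k, v⟩ := p
    have hk : ¬ k < 0 := by have := h (k, v) (by simp); omega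
    have hrest : ∀ p ∈ rest, 0 ≤ p.1 := fun p hp => h p (by simp [hp])
    simp [pvCollectA, hk, ih hrest]

theorem pvCollectA_neg (xs : List (Int × Int)) (h : ∃ p ∈ xs, p.1 < 0) :
    pvCollectA xs = none := by
  induction xs with
  | nil => simp at h
  | cons p rest ih =>
    obtain ⟨k, v⟩ := p
    by_cases hk : k < 0
    · simp [pvCollectA, hk]
    · obtain ⟨q, hq, hqneg⟩ := h
      rcases List.mem_cons.mp hq with rfl | hq'
      · simp at hqneg; omega
      · simp [pvCollectA, hk, ih ⟨q, hq', hqneg⟩]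

-- B's single pass, characterised
theorem pvFoldB_none (xs : List (Int × Int)) : xs.foldl pvStepB none = none := by
  induction xs with
  | nil => rfl
  | cons p rest ih => simpa [pvStepB] using ih

theorem pvFoldB_neg (xs : List (Int × Int)) (st : Option (PySem.Dict Int Int × Int × Option (Int × Int)))
    (h : ∃ p ∈ xs, p.1 < 0) : xs.foldl pvStepB st = none := by
  induction xs generalizing st with
  | nil => simp at h
  | cons p rest ih =>
    cases st with
    | none => rw [List.foldl_cons]; exact pvFoldB_none rest ▸ (by simp [pvStepB, pvFoldB_none])
    | some t =>
      obtain ⟨d, m, s⟩ := t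
      by_cases hp : p.1 < 0
      · simp [List.foldl_cons, pvStepB, hp, pvFoldB_none]
      · obtain ⟨q, hq, hqneg⟩ := h
        rcases List.mem_cons.mp hq with rfl | hq'
        · omega
        · rw [List.foldl_cons]
          exact ih _ ⟨q, hq', hqneg⟩

theorem pvFoldB_pos (xs : List (Int × Int)) :
    ∀ (h : ∀ p ∈ xs, 0 ≤ p.1) (d : PySem.Dict Int Int) (m : Int) (s : Option (Int × Int)),
    ∃ s', xs.foldl pvStepB (some (d, m, s)) =
      some (xs.foldl (fun d p => d.insert p.1 p.2) d,
            xs.foldl (fun m p => if p.1 > m then p.1 else m) m, s') := by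
  induction xs with
  | nil => intro h d m s; exact ⟨s, rfl⟩
  | cons p rest ih =>
    intro h d m s
    have hp : ¬ p.1 < 0 := by have := h p (by simp); omega
    have hrest : ∀ q ∈ rest, 0 ≤ q.1 := fun q hq => h q (by simp [hq])
    obtain ⟨s', hs'⟩ := ih hrest
      (d.insert p.1 p.2) (if p.1 > m then p.1 else m)
      (match s with
       | none => some (p.1, p.2)
       | some (mi, sv) => if p.1 < mi then some (p.1, p.2) else some (mi, sv))
    exact ⟨s', by simpa [pvStepB, hp] using hs'⟩

-- the dict built by B answers with the LAST write
theorem pvDictGet (xs : List (Int × Int)) :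
    ∀ (d : PySem.Dict Int Int) (k : Int),
    (xs.foldl (fun d p => d.insert p.1 p.2) d).get? k =
      match pvLastVal xs k with
      | some v => some v
      | none => d.get? k := by
  induction xs with
  | nil => intro d k; simp [pvLastVal_nil]
  | cons p rest ih =>
    intro d k
    rw [List.foldl_cons, ih, pvLastVal_cons]
    cases hv : pvLastVal rest k with
    | some v => rfl
    | none =>
      rw [PySem.Dict.get?_insert]
      by_cases hk : p.1 = k
      · simp [hk]
      · rw [if_neg fun h => hk h.symm]
        simp [hk]

-- B's running maximum
theorem pvFoldMax_bounds (xs : List (Int × Int)) :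
    ∀ (m : Int), m ≤ xs.foldl (fun m p => if p.1 > m then p.1 else m) m ∧
      (∀ p ∈ xs, p.1 ≤ xs.foldl (fun m p => if p.1 > m then p.1 else m) m) := by
  induction xs with
  | nil => intro m; exact ⟨le_refl m, by simp⟩
  | cons p rest ih =>
    intro m
    rw [List.foldl_cons]
    by_cases hpm : p.1 > m
    · simp only [if_pos hpm]
      obtain ⟨h1, h2⟩ := ih p.1
      refine ⟨by omega, ?_⟩
      intro q hq
      rcases List.mem_cons.mp hq with rfl | hq'
      · omega
      · exact h2 q hq'
    · simp only [if_neg hpm]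
      obtain ⟨h1, h2⟩ := ih m
      refine ⟨h1, ?_⟩
      intro q hq
      rcases List.mem_cons.mp hq with rfl | hq'
      · omega
      · exact h2 q hq' 

theorem pvFoldMax_mem (xs : List (Int × Int)) :
    ∀ (m : Int), xs.foldl (fun m p => if p.1 > m then p.1 else m) m = m ∨
      ∃ p ∈ xs, xs.foldl (fun m p => if p.1 > m then p.1 else m) m = p.1 := by
  induction xs with
  | nil => intro m; exact Or.inl rfl
  | cons p rest ih =>
    intro m
    rw [List.foldl_cons]
    by_cases hpm : p.1 > m
    · simp only [if_pos hpm]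
      rcases ih p.1 with heq | ⟨q, hq, hqe⟩
      · exact Or.inr ⟨p, by simp, heq⟩
      · exact Or.inr ⟨q, by simp [hq], hqe⟩
    · simp only [if_neg hpm]
      rcases ih m with heq | ⟨q, hq, hqe⟩
      · exact Or.inl heq
      · exact Or.inr ⟨q, by simp [hq], hqe⟩

-- A's scatter loop, characterised positionally
theorem pvScatter_getElem? (xs : List (Int × Int)) :
    ∀ (acc : List Int), (∀ p ∈ xs, 0 ≤ p.1 ∧ p.1 < (acc.length : Int)) → ∀ (k : Nat),
    (xs.foldl (fun acc p => PySem.List.pySetD acc p.1 p.2) acc)[k]? =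
      match pvLastVal xs (k : Int) with
      | some v => some v
      | none => acc[k]? := by
  induction xs with
  | nil => intro acc _ k; simp [pvLastVal_nil]
  | cons p rest ih =>
    intro acc h k
    obtain ⟨hp0, hplt⟩ := h p (by simp)
    have hset : PySem.List.pySetD acc p.1 p.2 = acc.set p.1.toNat p.2 :=
      PySem.List.pySetD_of_nonneg acc p.2 hp0
    have hlen : (acc.set p.1.toNat p.2).length = acc.length := List.length_set ..
    rw [List.foldl_cons, hset, ih _ (fun q hq => by
      have := h q (by simp [hq]); rwa [hlen]) k, pvLastVal_cons]
    cases hv : pvLastVal rest (k : Int) with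
    | some v => rfl
    | none =>
      rw [List.getElem?_set]
      by_cases hk : p.1 = (k : Int)
      · have : p.1.toNat = k := by omega
        have hklt : k < acc.length := by omega
        simp [this, hk, hklt]
      · have : p.1.toNat ≠ k := by omega
        simp [this, hk]

-- stability of Python's sort: the last pair with a given index is the same before and after sorting
theorem pvLastVal_insertBy (x : Int × Int) (s : List (Int × Int)) (k : Int)
    (hs : s.Pairwise (fun a b => a.1 ≤ b.1)) :
    pvLastVal (PySem.List.insertBy (fun a b => decide (a.1 < b.1)) x s) k =
      if x.1 = k then some x.2 else pvLastVal s k := by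
  induction s with
  | nil =>
    simp only [PySem.List.insertBy, pvLastVal_cons, pvLastVal_nil]
  | cons y ys ih =>
    have hy : ∀ q ∈ ys, y.1 ≤ q.1 := fun q hq => List.rel_of_pairwise_cons hs hq
    have hys : ys.Pairwise (fun a b => a.1 ≤ b.1) := hs.of_cons
    unfold PySem.List.insertBy
    by_cases hb : x.1 < y.1
    · simp only [hb, decide_true, if_true]
      rw [pvLastVal_cons (p := x)]
      by_cases hk : x.1 = k
      · have : pvLastVal (y :: ys) k = none := by
          apply pvLastVal_eq_none
          intro q hq
          rcases List.mem_cons.mp hq with rfl | hq' <;> [skip; have := hy q hq'] <;> omega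
        simp [this, hk]
      · cases hv : pvLastVal (y :: ys) k <;> simp [hv, hk]
    · simp only [hb, decide_false, Bool.false_eq_true, if_false]
      rw [pvLastVal_cons (p := y), pvLastVal_cons (p := y), ih hys]
      by_cases hk : x.1 = k
      · simp [hk]
      · simp [hk]

theorem pvLastVal_sorted (xs : List (Int × Int)) (k : Int) :
    pvLastVal (PySem.List.sorted xs (fun p => p.1) false) k = pvLastVal xs k := by
  induction xs using List.reverseRecOn with
  | nil => rfl
  | append_singleton xs x ih =>
    have hfold : PySem.List.sorted (xs ++ [x]) (fun p => p.1) false =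
        PySem.List.insertBy (fun a b => decide (a.1 < b.1)) x
          (PySem.List.sorted xs (fun p => p.1) false) := by
      rw [PySem.List.sorted_eq_foldl_insertBy, PySem.List.sorted_eq_foldl_insertBy,
        List.foldl_append, List.foldl_cons, List.foldl_nil]
    rw [hfold, pvLastVal_insertBy x _ k (PySem.List.sorted_pairwise ..),
      pvLastVal_append_singleton, ih]

theorem pvGetLastD_mem (l : List (Int × Int)) (h : l ≠ []) (d : Int × Int) : l.getLastD d ∈ l := by
  rw [List.getLastD_eq_getLast?, List.getLast?_eq_some_getLast h]
  exact List.getLast_mem h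

-- the last element of the sorted list bounds every index
theorem pvLast_ge (l : List (Int × Int)) (h : l.Pairwise (fun a b => a.1 ≤ b.1)) (d : Int × Int) :
    ∀ p ∈ l, p.1 ≤ (l.getLastD d).1 := by
  induction l generalizing d with
  | nil => simp
  | cons y ys ih =>
    intro p hp
    rw [List.getLastD_cons]
    rcases List.mem_cons.mp hp with rfl | hp'
    · rcases List.eq_nil_or_concat ys with rfl | _
      · simp
      · have hmem := pvGetLastD_mem ys (by rename_i h'; obtain ⟨a, b, rfl⟩ := h'; simp) p
        exact List.rel_of_pairwise_cons h hmem
    · exact ih h.of_cons y p hp' 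


-- ===== VERDICT (by name: the statement is the Claim_ definition above) =====
theorem dense_indexed_values_spec : Claim_equal_dense_indexed_values := by
  intro value _
  show dense_indexed_values value = dense_indexed_values_alt value
  by_cases hnil : value = []
  · simp [dense_indexed_values, dense_indexed_values_alt, hnil]
  by_cases hpos : ∀ p ∈ value, 0 ≤ p.1
  · obtain ⟨s', hB⟩ := pvFoldB_pos value hpos PySem.Dict.empty (-1) none
    simp only [dense_indexed_values, dense_indexed_values_alt, if_neg hnil,
      pvCollectA_pos value hpos, hB]
    set sl := PySem.List.sorted value (fun pair => pair.1) false with hsl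
    have hsne : sl ≠ [] := by
      rw [hsl, Ne, PySem.List.sorted_eq_nil_iff]; exact hnil
    have hLmem : sl.getLastD (0, 0) ∈ value := by
      have := pvGetLastD_mem sl hsne (0, 0)
      rw [hsl] at this
      exact (PySem.List.mem_sorted _ _ _ _).mp this
    have hpair : List.Pairwise (fun a b => a.1 ≤ b.1) sl := by
      rw [hsl]; exact PySem.List.sorted_pairwise ..
    have hL0 : 0 ≤ (sl.getLastD (0, 0)).1 := hpos _ hLmem
    have hge : ∀ p ∈ value, p.1 ≤ (sl.getLastD (0, 0)).1 := by
      intro p hp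
      exact pvLast_ge sl hpair (0, 0) p (by rw [hsl]; exact (PySem.List.mem_sorted _ _ _ _).mpr hp)
    have hMeq : List.foldl (fun m p => if p.1 > m then p.1 else m) (-1) value
        = (sl.getLastD (0, 0)).1 := by
      have h1 := (pvFoldMax_bounds value (-1)).2 _ hLmem
      rcases pvFoldMax_mem value (-1) with heq | ⟨q, hq, hqe⟩
      · omega
      · have := hge q hq; omega
    rw [hMeq]
    congr 1
    set N := (sl.getLastD (0, 0)).1 + 1 with hN
    set acc := List.map (fun _ => pvDefaultValueA (sl.headD (0, 0)).2)
      (PySem.List.pyRange 0 N 1) with hacc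
    have hacclen : acc.length = N.toNat := by
      rw [hacc, List.length_map, PySem.List.length_pyRange_one]
      norm_num
    have hrange : ∀ (k : Nat), (PySem.List.pyRange 0 N 1)[k]? =
        if k < N.toNat then some ((k : Int)) else none := by
      intro k
      rw [PySem.List.pyRange_one, List.getElem?_map]
      have hN0 : (N - 0).toNat = N.toNat := by omega
      rw [hN0]
      by_cases h : k < N.toNat
      · rw [List.getElem?_range h, if_pos h]
        simp
      · rw [List.getElem?_eq_none (by rw [List.length_range]; omega), if_neg h]
        simp
    have hbound : ∀ p ∈ sl, 0 ≤ p.1 ∧ p.1 < ((acc.length : Int)) := by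
      intro p hp
      have hp' : p ∈ value := by rw [hsl] at hp; exact (PySem.List.mem_sorted _ _ _ _).mp hp
      have := hpos p hp'
      have := hge p hp'
      rw [hacclen]
      omega
    apply List.ext_getElem?
    intro k
    rw [pvScatter_getElem? sl acc hbound k, hsl, pvLastVal_sorted]
    by_cases hk : k < N.toNat
    · cases hv : pvLastVal value (k : Int) with
      | some v =>
        simp [hv, hacc, List.getElem?_map, hrange k, hk, pvDictGet value PySem.Dict.empty]
      | none =>
        simp [hv, hacc, List.getElem?_map, hrange k, hk, pvDictGet value PySem.Dict.empty,
          PySem.Dict.get?_empty, pvDefaultValueA]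
    · have hnone : pvLastVal value (k : Int) = none := by
        apply pvLastVal_eq_none
        intro p hp
        have h1 : p.1 + 1 ≤ N := by rw [hN]; have := hge p hp; omega
        omega
      simp [hnone, hacc, List.getElem?_map, hrange k, hk]
  · simp only [not_forall, not_le, exists_prop] at hpos
    obtain ⟨q, hq, hqn⟩ := hpos
    simp only [dense_indexed_values, dense_indexed_values_alt, if_neg hnil,
      pvCollectA_neg value ⟨q, hq, by omega⟩, pvFoldB_neg value _ ⟨q, hq, by omega⟩]
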